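-- pv_equiv track=rewrite | github.com/ohjiae/SolvProbStudy_py | hojin/[PRG]60058-괄호_변환.py | splituv
-- ===== SOURCE A (Python) =====
-- def is_balanced(p):
--     # counts=Counter(p)
--     # return 1 if counts['(']==counts[')'] else 0
--     return p.count('(') == p.count(')')
--
-- def splituv(str):
--     u, v = str, ""
--     for i in range(2, len(str), 2):
--         if is_balanced(str[:i]):
--             u = str[:i]
--             v = str[i:]
--             break
--     return u, v
-- ===== SOURCE B (Python) =====
-- def splituv(str):
--     bal = 0
--     n = len(str)
--     for i, ch in enumerate(str):
--         if ch == '(':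
--             bal += 1
--         elif ch == ')':
--             bal -= 1
--         j = i + 1
--         if j % 2 == 0 and j < n and bal == 0:
--             return str[:j], str[j:]
--     return str, ""
-- ===== Notes on version B (the rewrite author's own statement) =====
-- stated objective: faster
-- what changed: B replaces A's rescan of every even prefix (a full substring count per candidate index) with a single left-to-right pass that maintains a running parenthesis balance and returns at the first even index before the end where the balance is zero.
import Mathlib
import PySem

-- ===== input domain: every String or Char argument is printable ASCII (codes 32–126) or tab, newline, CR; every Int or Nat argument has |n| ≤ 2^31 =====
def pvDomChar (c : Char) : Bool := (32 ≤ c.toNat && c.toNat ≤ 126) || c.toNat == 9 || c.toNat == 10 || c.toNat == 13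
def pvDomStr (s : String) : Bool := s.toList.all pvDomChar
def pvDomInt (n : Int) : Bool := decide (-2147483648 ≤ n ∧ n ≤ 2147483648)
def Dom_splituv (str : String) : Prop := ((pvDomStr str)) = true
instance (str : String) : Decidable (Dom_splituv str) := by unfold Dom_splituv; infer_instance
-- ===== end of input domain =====

-- B replaces A's per-prefix rescans with one pass keeping a running paren balance (objective: faster).


-- ===== PORT A =====
-- is_balanced(p): p.count('(') == p.count(')')
def pvIsBalanced (p : String) : Bool := PySem.Str.count p "(" == PySem.Str.count p ")"

-- the 'for i in range(2, len(str), 2): … break' loop, recursing over the range list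
def pvGoA (s : String) : List Int → String × String
  | [] => (s, "")
  | i :: rest =>
      if pvIsBalanced (PySem.Str.slice s none (some i)) then
        (PySem.Str.slice s none (some i), PySem.Str.slice s (some i) none)
      else pvGoA s rest

def splituv (str : String) : String × String :=
  pvGoA str (PySem.List.pyRange 2 (PySem.Str.len str) 2)

-- ===== PORT B =====
-- the 'for i, ch in enumerate(str)' loop of Source B: running balance bal, current index i
def pvGoB (s : String) (n : Int) : List Char → Int → Nat → String × String
  | [], _, _ => (s, "")
  | ch :: rest, bal, i =>
      let bal' := if ch = '(' then bal + 1 else if ch = ')' then bal - 1 else bal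
      let j := i + 1
      if j % 2 = 0 ∧ (j : Int) < n ∧ bal' = 0 then
        (PySem.Str.slice s none (some (j : Int)), PySem.Str.slice s (some (j : Int)) none)
      else pvGoB s n rest bal' j

def splituv_alt (str : String) : String × String :=
  pvGoB str (PySem.Str.len str) str.toList 0 0

-- ===== PRECONDITION & SPEC =====
def Spec_splituv (str : String) (out : String × String) : Prop := out = splituv_alt str
instance (str : String) (out : String × String) : Decidable (Spec_splituv str out) := by unfold Spec_splituv; infer_instance

-- ===== CLAIM (what is proved, stated in full; the proofs are below) =====
def Claim_equal_splituv : Prop := ∀ (str : String), Dom_splituv str → Spec_splituv str (splituv str)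

-- ===== LEMMAS AND PROOFS =====

-- running balance of a prefix: #'(' - #')'
def pvDiff (l : List Char) : Int := (l.count '(' : Int) - (l.count ')' : Int)

lemma pv_count_go_single (c : Char) :
    ∀ (l : List Char) (fuel acc : Nat), l.length ≤ fuel →
      PySem.Chars.count.go [c] fuel l acc = acc + l.count c := by
  intro l
  induction l with
  | nil => intro fuel acc h; cases fuel <;> simp [PySem.Chars.count.go]
  | cons hd tl ih =>
      intro fuel acc h
      cases fuel with
      | zero => simp at h
      | succ f =>
          rw [PySem.Chars.count.go]
          simp only [List.length_cons, Nat.add_le_add_iff_right] at h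
          by_cases hc : c = hd
          · subst hc
            rw [if_pos (by simp [List.isPrefixOf])]
            simp only [List.length_cons, List.length_nil, List.drop_succ_cons, List.drop_zero]
            rw [ih f (acc + 1) h]
            simp
            omega
          · rw [if_neg (by simp [List.isPrefixOf]; exact hc)]
            rw [ih f acc h]
            have hc2 : ¬ hd = c := fun hx => hc hx.symm
            simp [hc2]

lemma pv_count_single (c : Char) (l : List Char) :
    PySem.Chars.count l [c] = l.count c := by
  simp [PySem.Chars.count]
  have := pv_count_go_single c l l.length 0 le_rfl; omega

lemma pv_balanced_iff (p : String) :
    pvIsBalanced p = true ↔ pvDiff p.toList = 0 := by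
  simp [pvIsBalanced, pvDiff, pv_count_single]
  omega

lemma pvRange_two_nil (a b : Int) (h : b ≤ a) : PySem.List.pyRange a b 2 = [] := by
  rw [PySem.List.pyRange_of_pos a b (by norm_num)]
  rw [if_neg (by omega)]
  simp

lemma pvRange_two_cons (a b : Int) (h : a < b) :
    PySem.List.pyRange a b 2 = a :: PySem.List.pyRange (a + 2) b 2 := by
  rw [PySem.List.pyRange_of_pos a b (by norm_num),
      PySem.List.pyRange_of_pos (a + 2) b (by norm_num)]
  rw [if_pos h]
  have h2 : (((b - a + 2 - 1) / 2).toNat)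
      = (if a + 2 < b then ((b - (a + 2) + 2 - 1) / 2).toNat else 0) + 1 := by
    split <;> omega
  rw [h2, List.range_succ_eq_map]
  simp only [List.map_cons, List.map_map, Nat.cast_zero, mul_zero, add_zero]
  congr 1
  apply List.map_congr_left
  intro k _
  simp [Function.comp]
  ring

-- main invariant: B's loop from state (suffix, balance-of-prefix, index k) computes
-- exactly A's scan of the remaining even candidate indices
lemma pv_key (s : String) :
    ∀ (l : List Char) (k : Nat), s.toList.drop k = l →
      pvGoB s ((s.toList.length : Int)) l (pvDiff (s.toList.take k)) k
        = pvGoA s (PySem.List.pyRange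
            (if k % 2 = 0 then (k : Int) + 2 else (k : Int) + 1) (s.toList.length) 2) := by
  intro l
  induction l with
  | nil =>
      intro k hk
      have hlen : s.toList.length ≤ k := by
        have h2 := congrArg List.length hk
        simp only [List.length_drop, List.length_nil] at h2
        omega
      rw [pvGoB, pvRange_two_nil _ _ (by split <;> push_cast <;> omega), pvGoA]
  | cons ch rest ih =>
      intro k hk
      have hkl : k < s.toList.length := by
        have h2 := congrArg List.length hk
        simp only [List.length_drop, List.length_cons] at h2
        omega
      have hsplit : s.toList.drop k = s.toList[k] :: s.toList.drop (k + 1) :=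
        List.drop_eq_getElem_cons hkl
      rw [hk] at hsplit
      obtain ⟨hch, hdrop⟩ : s.toList[k] = ch ∧ s.toList.drop (k + 1) = rest :=
        ⟨(List.cons_eq_cons.mp hsplit.symm).1, (List.cons_eq_cons.mp hsplit.symm).2⟩
      have htake : s.toList.take (k + 1) = s.toList.take k ++ [ch] := by
        rw [List.take_add_one]
        simp [List.getElem?_eq_getElem hkl, hch]
      have hbal : (if ch = '(' then pvDiff (s.toList.take k) + 1
            else if ch = ')' then pvDiff (s.toList.take k) - 1
            else pvDiff (s.toList.take k)) = pvDiff (s.toList.take (k + 1)) := by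
        rw [htake]
        simp only [pvDiff, List.count_append, List.count_singleton]
        by_cases h1 : ch = '(' <;> by_cases h2 : ch = ')' <;>
          simp [h1, h2] <;> omega
      simp only [pvGoB, hbal]
      rcases Nat.even_or_odd k with hke | hko
      · -- k even: j = k+1 is odd, B skips it; next even candidate stays k+2
        have hkm : k % 2 = 0 := Nat.even_iff.mp hke
        rw [if_neg (by push_cast; omega)]
        rw [ih (k + 1) hdrop, if_neg (by omega), if_pos hkm]
        have hcast : ((k + 1 : Nat) : Int) + 1 = (k : Int) + 2 := by push_cast; ring
        rw [hcast]
      · -- k odd: j = k+1 is even — B tests exactly A's next candidate index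
        have hkm : k % 2 = 1 := Nat.odd_iff.mp hko
        rw [if_neg (by omega : ¬ k % 2 = 0),
            (by push_cast; ring : ((k : Int) + 1) = ((k + 1 : Nat) : Int))]
        by_cases hjn : k + 1 < s.toList.length
        · rw [pvRange_two_cons ((k + 1 : Nat) : Int) _ (by exact_mod_cast hjn), pvGoA]
          have hsl : (PySem.Str.slice s none (some ((k + 1 : Nat) : Int))).toList
              = s.toList.take (k + 1) := by
            rw [PySem.Str.toList_slice, PySem.Chars.slice_eq_listSlice, PySem.List.slice_to_natCast]
          by_cases hz : pvDiff (s.toList.take (k + 1)) = 0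
          · rw [if_pos ⟨by omega, by exact_mod_cast hjn, hz⟩,
                if_pos (by rw [pv_balanced_iff, hsl]; exact hz)]
          · rw [if_neg (fun hcon => hz hcon.2.2),
                if_neg (by rw [pv_balanced_iff, hsl]; exact hz)]
            rw [ih (k + 1) hdrop, if_pos (by omega)]
        · rw [if_neg (by push_cast; omega)]
          rw [ih (k + 1) hdrop, if_pos (by omega)]
          rw [pvRange_two_nil _ _ (by push_cast; omega),
              pvRange_two_nil _ _ (by push_cast; omega)]

-- ===== VERDICT (by name: the statement is the Claim_ definition above) =====
theorem splituv_spec : Claim_equal_splituv := by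
  intro str _
  unfold Spec_splituv splituv splituv_alt
  have hn : PySem.Str.len str = (str.toList.length : Int) := by simp
  have h := pv_key str str.toList 0 (by simp)
  norm_num [pvDiff] at h
  rw [hn, (by norm_num : ((str.toList.length : Int)) = ((str.length : Int)))]
  exact h.symm
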